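-- pv_equiv track=rewrite | github.com/Jiwonii97/Algorithm_Study | 프로그래머스/코딩테스트연습_택배상자.py | solution
-- ===== SOURCE A (Python) =====
-- def solution(order):
--     from collections import deque
--     answer = 0
--
--     conveyBelt = deque(range(1, len(order)+1))
--     st = []
--
--     for o in order:
--         if o in st:     # 스택에 있는지 확인
--             if o == st[-1]:
--                 st.pop()
--                 answer += 1
--                 continue
--             else:
--                 break
--
--         # 없으면 컨테이너 벨트에서 찾는다
--         while conveyBelt:
--             box = conveyBelt.popleft()
--             if box == o:
--                 answer += 1
--                 break
--             else:
--                 st.append(box)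
--
--     return answer
-- ===== SOURCE B (Python) =====
-- def solution(order):
--     # Run-length stack: the side stack is kept as a list of disjoint increasing
--     # runs (lo, hi) of consecutive box numbers, the belt is just a pointer nxt.
--     # Popping shrinks the top run; "is o buried?" is a binary search on run starts.
--     n = len(order)
--     runs = []
--     nxt = 1
--     answer = 0
--     for o in order:
--         if runs and runs[-1][1] == o:
--             lo, hi = runs.pop()
--             if lo < hi:
--                 runs.append((lo, hi - 1))
--             answer += 1
--             continue
--         # binary search: first run index whose lo exceeds o
--         i, j = 0, len(runs)
--         while i < j:
--             m = (i + j) // 2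
--             if runs[m][0] <= o:
--                 i = m + 1
--             else:
--                 j = m
--         if i > 0 and o <= runs[i - 1][1]:
--             break  # o is buried inside some run: loading stops here
--         if nxt <= o <= n:
--             if nxt < o:
--                 runs.append((nxt, o - 1))
--             nxt = o + 1
--             answer += 1
--         else:
--             if nxt <= n:
--                 runs.append((nxt, n))
--             nxt = n + 1
--     return answer
-- ===== Notes on version B (the rewrite author's own statement) =====
-- stated objective: faster
-- what changed: B keeps the side stack as a run-length list of disjoint (lo,hi) ranges with a belt pointer instead of A's deque plus element stack: pushing skipped boxes is one appended pair, popping shrinks the top run, and the buried-box test is a binary search over run starts instead of A's linear 'o in st' scan.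
import Mathlib
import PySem

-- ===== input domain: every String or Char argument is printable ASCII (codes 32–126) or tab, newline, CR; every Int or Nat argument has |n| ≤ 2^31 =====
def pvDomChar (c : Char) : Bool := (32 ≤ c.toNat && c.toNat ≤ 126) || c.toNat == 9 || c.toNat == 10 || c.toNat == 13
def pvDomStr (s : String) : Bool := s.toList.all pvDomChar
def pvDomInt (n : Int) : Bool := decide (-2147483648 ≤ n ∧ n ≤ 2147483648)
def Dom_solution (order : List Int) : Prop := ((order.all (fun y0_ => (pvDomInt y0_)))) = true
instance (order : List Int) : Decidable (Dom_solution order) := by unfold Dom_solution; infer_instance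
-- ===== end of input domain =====

-- B stores the side stack as run-length (lo,hi) ranges with a belt pointer and a binary search
-- for the buried-box test, replacing A's deque and linear stack scan (objective: faster).


-- ===== PORT A =====
-- A's inner `while conveyBelt:` loop: pop boxes from the front of the belt,
-- pushing non-matching ones onto the stack, until the wanted box (or the belt runs out).
def beltScan : List Int → Int → List Int → Int → (List Int × List Int × Int)
  | [], _, st, ans => ([], st, ans)
  | box :: belt, o, st, ans =>
    if box = o then (belt, st, ans + 1)
    else beltScan belt o (st ++ [box]) ans

-- A's `for o in order:` loop over state (conveyBelt, st, answer); `break` returns answer.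
def aLoop : List Int → List Int → List Int → Int → Int
  | [], _, _, ans => ans
  | o :: rest, belt, st, ans =>
    if o ∈ st then
      if PySem.List.pyGet? st (-1) = some o then aLoop rest belt st.dropLast (ans + 1)
      else ans
    else
      match beltScan belt o st ans with
      | (belt', st', ans') => aLoop rest belt' st' ans'

def solution (order : List Int) : Int :=
  aLoop order (PySem.List.pyRange 1 ((order.length : Int) + 1) 1) [] 0

-- ===== PORT B =====
-- B's `while i < j:` hand-written binary search: first run index whose lo exceeds o.
def bsearchGo (runs : List (Int × Int)) (o : Int) : Nat → Nat → Nat → Nat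
  | 0, i, _ => i
  | fuel + 1, i, j =>
    if i < j then
      if (runs.getD ((i + j) / 2) (0, 0)).1 ≤ o then bsearchGo runs o fuel ((i + j) / 2 + 1) j
      else bsearchGo runs o fuel i ((i + j) / 2)
    else i

def bsearch (runs : List (Int × Int)) (o : Int) (i j : Nat) : Nat :=
  bsearchGo runs o (j - i) i j

-- B's pop branch: `lo, hi = runs.pop(); if lo < hi: runs.append((lo, hi-1))`.
def popShrink (runs : List (Int × Int)) : List (Int × Int) :=
  match runs.getLast? with
  | some (lo, hi) => if lo < hi then runs.dropLast ++ [(lo, hi - 1)] else runs.dropLast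
  | none => runs

-- B's `for o in order:` loop over state (runs, nxt, answer); `break` returns answer.
def bLoop : List Int → List (Int × Int) → Int → Int → Int → Int
  | [], _, _, _, ans => ans
  | o :: rest, runs, nxt, n, ans =>
    if runs.getLast?.map (·.2) = some o then
      bLoop rest (popShrink runs) nxt n (ans + 1)
    else if 0 < bsearch runs o 0 runs.length ∧
            o ≤ (runs.getD (bsearch runs o 0 runs.length - 1) (0, 0)).2 then ans
    else if nxt ≤ o ∧ o ≤ n then
      bLoop rest (runs ++ if nxt < o then [(nxt, o - 1)] else []) (o + 1) n (ans + 1)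
    else
      bLoop rest (runs ++ if nxt ≤ n then [(nxt, n)] else []) (n + 1) n ans

def solution_alt (order : List Int) : Int :=
  bLoop order [] 1 (order.length : Int) 0

-- ===== PRECONDITION & SPEC =====
def Spec_solution (order : List Int) (out : Int) : Prop := out = solution_alt order
instance (order : List Int) (out : Int) : Decidable (Spec_solution order out) := by unfold Spec_solution; infer_instance

-- ===== CLAIM (what is proved, stated in full; the proofs are below) =====
def Claim_equal_solution : Prop := ∀ (order : List Int), Dom_solution order → Spec_solution order (solution order)

-- ===== LEMMAS AND PROOFS =====

-- The element stack that B's run list denotes.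
def flatRuns (runs : List (Int × Int)) : List Int :=
  runs.flatMap (fun p => PySem.List.pyRange p.1 (p.2 + 1) 1)

lemma pyGet?_neg_one (xs : List Int) : PySem.List.pyGet? xs (-1) = xs.getLast? := by
  cases xs with
  | nil => rfl
  | cons a t =>
    have h : PySem.List.pyIdx? (a :: t).length (-1) = some t.length := by
      simp [PySem.List.pyIdx?]
    simp only [PySem.List.pyGet?, h, Option.bind_some]
    rw [List.getLast?_eq_getElem?]
    simp

lemma beltScan_notfound (o : Int) : ∀ (belt st : List Int) (ans : Int), o ∉ belt →
    beltScan belt o st ans = ([], st ++ belt, ans) := by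
  intro belt
  induction belt with
  | nil => intro st ans _; simp [beltScan]
  | cons box t ih =>
    intro st ans h
    have h1 : box ≠ o := fun he => h (he ▸ List.mem_cons_self)
    have h2 : o ∉ t := fun hm => h (List.mem_cons_of_mem _ hm)
    simp only [beltScan, if_neg h1]
    rw [ih (st ++ [box]) ans h2]
    simp

lemma beltScan_found (o b : Int) : ∀ (k : Nat) (a : Int) (st : List Int) (ans : Int),
    a ≤ o → o < b → (o - a).toNat = k →
    beltScan (PySem.List.pyRange a b 1) o st ans
      = (PySem.List.pyRange (o + 1) b 1, st ++ PySem.List.pyRange a o 1, ans + 1) := by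
  intro k
  induction k with
  | zero =>
    intro a st ans h1 h2 hk
    have ha : a = o := by omega
    subst ha
    rw [PySem.List.pyRange_one_cons h2]
    simp [beltScan, PySem.List.pyRange_one_eq_nil (le_refl a)]
  | succ k ih =>
    intro a st ans h1 h2 hk
    have hab : a < b := by omega
    have hao : a < o := by omega
    rw [PySem.List.pyRange_one_cons hab]
    have hne : a ≠ o := by omega
    simp only [beltScan, if_neg hne]
    rw [ih (a + 1) (st ++ [a]) ans (by omega) h2 (by omega)]
    rw [PySem.List.pyRange_one_cons hao]
    simp

lemma bsearchGo_spec (runs : List (Int × Int)) (o : Int)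
    (hs : runs.Pairwise (fun p q => p.1 < q.1)) :
    ∀ (fuel i j : Nat), j - i ≤ fuel → i ≤ j → j ≤ runs.length →
    (∀ t, t < i → (runs.getD t (0, 0)).1 ≤ o) →
    (∀ t, j ≤ t → t < runs.length → o < (runs.getD t (0, 0)).1) →
    bsearchGo runs o fuel i j ≤ runs.length ∧
    (∀ t, t < bsearchGo runs o fuel i j → (runs.getD t (0, 0)).1 ≤ o) ∧
    (∀ t, bsearchGo runs o fuel i j ≤ t → t < runs.length → o < (runs.getD t (0, 0)).1) := by
  intro fuel
  induction fuel with
  | zero =>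
    intro i j hk hij hjlen h1 h2
    have : i = j := by omega
    subst this
    exact ⟨hjlen, h1, h2⟩
  | succ fuel ih =>
    intro i j hk hij hjlen h1 h2
    rw [bsearchGo]
    by_cases hcond : i < j
    · rw [if_pos hcond]
      have hm1 : i ≤ (i + j) / 2 := by omega
      have hm2 : (i + j) / 2 < j := by omega
      have hmlen : (i + j) / 2 < runs.length := by omega
      by_cases hlo : (runs.getD ((i + j) / 2) (0, 0)).1 ≤ o
      · rw [if_pos hlo]
        refine ih ((i + j) / 2 + 1) j (by omega) (by omega) hjlen ?_ h2
        intro t ht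
        by_cases hti : t < i
        · exact h1 t hti
        · by_cases htm : t = (i + j) / 2
          · exact htm ▸ hlo
          · have htlen : t < runs.length := by omega
            have := (List.pairwise_iff_getElem.mp hs) t ((i + j) / 2) htlen hmlen (by omega)
            rw [List.getD_eq_getElem _ _ htlen, List.getD_eq_getElem _ _ hmlen] at *
            omega
      · rw [if_neg hlo]
        refine ih i ((i + j) / 2) (by omega) (by omega) (by omega) h1 ?_
        intro t ht htlen
        by_cases htm : t = (i + j) / 2
        · subst htm; omega
        · have := (List.pairwise_iff_getElem.mp hs) ((i + j) / 2) t hmlen htlen (by omega)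
          rw [List.getD_eq_getElem _ _ htlen, List.getD_eq_getElem _ _ hmlen] at *
          omega
    · rw [if_neg hcond]
      have : i = j := by omega
      subst this
      exact ⟨hjlen, h1, h2⟩

-- The buried-box test of B answers membership in the flattened side stack.
lemma mem_iff_bsearch (runs : List (Int × Int)) (o : Int)
    (hpw : runs.Pairwise (fun p q => p.2 < q.1))
    (hok : ∀ p ∈ runs, p.1 ≤ p.2) :
    (0 < bsearch runs o 0 runs.length ∧
     o ≤ (runs.getD (bsearch runs o 0 runs.length - 1) (0, 0)).2) ↔ o ∈ flatRuns runs := by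
  have hs : runs.Pairwise (fun p q => p.1 < q.1) := by
    refine hpw.imp_of_mem ?_
    intro p q hp hq h
    have := hok p hp
    omega
  obtain ⟨hle, h1, h2⟩ : bsearch runs o 0 runs.length ≤ runs.length ∧
      (∀ t, t < bsearch runs o 0 runs.length → (runs.getD t (0, 0)).1 ≤ o) ∧
      (∀ t, bsearch runs o 0 runs.length ≤ t → t < runs.length → o < (runs.getD t (0, 0)).1) :=
    bsearchGo_spec runs o hs runs.length 0 runs.length (by omega) (by omega)
      (le_refl _) (by omega) (fun t ht htlen => by omega)
  have hmem : o ∈ flatRuns runs ↔ ∃ t, ∃ h : t < runs.length, runs[t].1 ≤ o ∧ o ≤ runs[t].2 := by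
    simp only [flatRuns, List.mem_flatMap, PySem.List.mem_pyRange_one]
    constructor
    · rintro ⟨p, hp, hlo, hhi⟩
      obtain ⟨t, ht, rfl⟩ := List.mem_iff_getElem.mp hp
      exact ⟨t, ht, hlo, by omega⟩
    · rintro ⟨t, ht, hlo, hhi⟩
      exact ⟨runs[t], List.getElem_mem ht, hlo, by omega⟩
  rw [hmem]
  constructor
  · rintro ⟨hr0, hro⟩
    have hrlen : bsearch runs o 0 runs.length - 1 < runs.length := by omega
    refine ⟨_, hrlen, ?_, ?_⟩
    · have := h1 (bsearch runs o 0 runs.length - 1) (by omega)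
      rwa [List.getD_eq_getElem _ _ hrlen] at this
    · rwa [List.getD_eq_getElem _ _ hrlen] at hro
  · rintro ⟨t, ht, hlo, hhi⟩
    have htr : t < bsearch runs o 0 runs.length := by
      by_contra hc
      have := h2 t (by omega) ht
      rw [List.getD_eq_getElem _ _ ht] at this
      omega
    have hrlen : bsearch runs o 0 runs.length - 1 < runs.length := by omega
    refine ⟨by omega, ?_⟩
    rw [List.getD_eq_getElem _ _ hrlen]
    by_cases hteq : t = bsearch runs o 0 runs.length - 1
    · subst hteq; exact hhi
    · have hsep := (List.pairwise_iff_getElem.mp hpw) t _ ht hrlen (by omega)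
      have := hok _ (List.getElem_mem hrlen)
      omega

lemma flatRuns_append (xs ys : List (Int × Int)) :
    flatRuns (xs ++ ys) = flatRuns xs ++ flatRuns ys := by
  simp [flatRuns]

lemma flatRuns_concat (rs : List (Int × Int)) (lo hi : Int) (h : lo ≤ hi) :
    flatRuns (rs ++ [(lo, hi)]) = (flatRuns rs ++ PySem.List.pyRange lo hi 1) ++ [hi] := by
  rw [flatRuns_append]
  have : flatRuns [(lo, hi)] = PySem.List.pyRange lo hi 1 ++ [hi] := by
    simp only [flatRuns, List.flatMap_cons, List.flatMap_nil, List.append_nil]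
    exact PySem.List.pyRange_one_succ_right h
  rw [this, List.append_assoc]

-- The common belt branch: o is not on the side stack, A scans the belt, B moves the pointer.
lemma belt_step (tl : List Int) (n : Int)
    (ih : ∀ (runs : List (Int × Int)) (nxt ans : Int),
      runs.Pairwise (fun p q => p.2 < q.1) → (∀ p ∈ runs, p.1 ≤ p.2 ∧ p.2 < nxt) → nxt ≤ n + 1 →
      aLoop tl (PySem.List.pyRange nxt (n + 1) 1) (flatRuns runs) ans = bLoop tl runs nxt n ans)
    (o : Int) (runs : List (Int × Int)) (nxt ans : Int)
    (hpw : runs.Pairwise (fun p q => p.2 < q.1))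
    (hok : ∀ p ∈ runs, p.1 ≤ p.2 ∧ p.2 < nxt) (hn : nxt ≤ n + 1) :
    (match beltScan (PySem.List.pyRange nxt (n + 1) 1) o (flatRuns runs) ans with
     | (belt', st', ans') => aLoop tl belt' st' ans')
    = (if nxt ≤ o ∧ o ≤ n then
        bLoop tl (runs ++ if nxt < o then [(nxt, o - 1)] else []) (o + 1) n (ans + 1)
      else
        bLoop tl (runs ++ if nxt ≤ n then [(nxt, n)] else []) (n + 1) n ans) := by
  by_cases hr : nxt ≤ o ∧ o ≤ n
  · rw [if_pos hr]
    rw [beltScan_found o (n + 1) (o - nxt).toNat nxt _ ans hr.1 (by omega) rfl]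
    have hflat : flatRuns (runs ++ if nxt < o then [(nxt, o - 1)] else [])
        = flatRuns runs ++ PySem.List.pyRange nxt o 1 := by
      by_cases hlt : nxt < o
      · rw [if_pos hlt, flatRuns_append]
        simp only [flatRuns, List.flatMap_cons, List.flatMap_nil, List.append_nil]
        have : o - 1 + 1 = o := by omega
        rw [this]
      · rw [if_neg hlt]
        have : nxt = o := by omega
        rw [PySem.List.pyRange_one_eq_nil (by omega)]
        simp
    rw [← hflat]
    refine ih _ (o + 1) (ans + 1) ?_ ?_ (by omega)
    · rw [List.pairwise_append]
      refine ⟨hpw, by split <;> simp, ?_⟩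
      intro p hp q hq
      have := (hok p hp).2
      rcases (by split at hq <;> simp_all : q = (nxt, o - 1) ∧ nxt < o ∨ q ∈ ([] : List (Int × Int))) with ⟨rfl, _⟩ | h
      · omega
      · simp at h
    · intro p hp
      rcases List.mem_append.mp hp with hp | hp
      · have := hok p hp; omega
      · split at hp <;> simp_all
  · rw [if_neg hr]
    have hnotin : o ∉ PySem.List.pyRange nxt (n + 1) 1 := by
      rw [PySem.List.mem_pyRange_one]; omega
    rw [beltScan_notfound o _ _ ans hnotin]
    have hflat : flatRuns (runs ++ if nxt ≤ n then [(nxt, n)] else [])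
        = flatRuns runs ++ PySem.List.pyRange nxt (n + 1) 1 := by
      by_cases hle : nxt ≤ n
      · rw [if_pos hle, flatRuns_append]
        simp [flatRuns]
      · rw [if_neg hle]
        rw [PySem.List.pyRange_one_eq_nil (by omega)]
        simp
    rw [← hflat]
    have hnil : PySem.List.pyRange (n + 1) (n + 1) 1 = [] :=
      PySem.List.pyRange_one_eq_nil (le_refl _)
    rw [← hnil]
    refine ih _ (n + 1) ans ?_ ?_ (by omega)
    · rw [List.pairwise_append]
      refine ⟨hpw, by split <;> simp, ?_⟩
      intro p hp q hq
      have := (hok p hp).2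
      rcases (by split at hq <;> simp_all : q = (nxt, n) ∧ nxt ≤ n ∨ q ∈ ([] : List (Int × Int))) with ⟨rfl, _⟩ | h
      · omega
      · simp at h
    · intro p hp
      rcases List.mem_append.mp hp with hp | hp
      · have := hok p hp; omega
      · split at hp <;> simp_all

lemma loops_eq : ∀ (rest : List Int) (runs : List (Int × Int)) (nxt n ans : Int),
    runs.Pairwise (fun p q => p.2 < q.1) →
    (∀ p ∈ runs, p.1 ≤ p.2 ∧ p.2 < nxt) → nxt ≤ n + 1 →
    aLoop rest (PySem.List.pyRange nxt (n + 1) 1) (flatRuns runs) ans = bLoop rest runs nxt n ans := by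
  intro rest
  induction rest with
  | nil => intro runs nxt n ans _ _ _; rfl
  | cons o tl ih =>
    intro runs nxt n ans hpw hok hn
    have hms := mem_iff_bsearch runs o hpw (fun p hp => (hok p hp).1)
    simp only [aLoop, bLoop, pyGet?_neg_one]
    rcases runs.eq_nil_or_concat with rfl | ⟨rs, ⟨lo, hi⟩, rfl⟩
    · simp only [flatRuns, List.flatMap_nil, List.not_mem_nil, if_false,
        List.getLast?_nil, Option.map_none]
      rw [if_neg (by simp)]
      rw [if_neg (fun hc => by simpa [flatRuns] using hms.mp hc)]
      exact belt_step tl n (fun runs' nxt' ans' => ih runs' nxt' n ans') o [] nxt ans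
        (by simp) (by simp) hn
    · simp only [List.concat_eq_append] at hpw hok hms ⊢
      have hlohi : lo ≤ hi ∧ hi < nxt := hok (lo, hi) (by simp)
      have hst := flatRuns_concat rs lo hi hlohi.1
      have hlast : (rs ++ [(lo, hi)]).getLast? = some (lo, hi) := List.getLast?_concat
      by_cases ho : hi = o
      · subst ho
        have hmem : hi ∈ flatRuns (rs ++ [(lo, hi)]) := by rw [hst]; simp
        rw [if_pos hmem]
        rw [hst, List.getLast?_concat]
        rw [if_pos rfl, if_pos (by rw [hlast]; rfl)]
        rw [List.dropLast_concat]
        have hpop : popShrink (rs ++ [(lo, hi)])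
            = if lo < hi then rs ++ [(lo, hi - 1)] else rs := by
          rw [popShrink, hlast]
          simp
        rw [hpop]
        by_cases hlh : lo < hi
        · rw [if_pos hlh]
          have : flatRuns (rs ++ [(lo, hi - 1)]) = flatRuns rs ++ PySem.List.pyRange lo hi 1 := by
            rw [flatRuns_append]
            simp only [flatRuns, List.flatMap_cons, List.flatMap_nil, List.append_nil]
            have : hi - 1 + 1 = hi := by omega
            rw [this]
          rw [← this]
          refine ih _ nxt n (ans + 1) ?_ ?_ hn
          · rw [List.pairwise_append] at hpw ⊢
            refine ⟨hpw.1, by simp, ?_⟩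
            intro p hp q hq
            have := hpw.2.2 p hp (lo, hi) (by simp)
            simp at hq
            subst hq
            simpa using this
          · intro p hp
            rcases List.mem_append.mp hp with hp | hp
            · exact hok p (List.mem_append_left _ hp)
            · simp at hp; subst hp; simp; omega
        · rw [if_neg hlh]
          have : PySem.List.pyRange lo hi 1 = [] := PySem.List.pyRange_one_eq_nil (by omega)
          rw [this, List.append_nil]
          exact ih rs nxt n (ans + 1) (hpw.sublist (List.sublist_append_left rs _))
            (fun p hp => hok p (List.mem_append_left _ hp)) hn
      · have htop : ¬ ((rs ++ [(lo, hi)]).getLast?.map (·.2) = some o) := by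
          rw [hlast]; simpa using ho
        rw [if_neg htop]
        by_cases hmem : o ∈ flatRuns (rs ++ [(lo, hi)])
        · rw [if_pos hmem]
          rw [if_neg (by rw [hst, List.getLast?_concat]; simpa using ho)]
          rw [if_pos (hms.mpr hmem)]
        · rw [if_neg hmem, if_neg (fun hc => hmem (hms.mp hc))]
          exact belt_step tl n (fun runs' nxt' ans' => ih runs' nxt' n ans') o _ nxt ans hpw hok hn

-- ===== VERDICT (by name: the statement is the Claim_ definition above) =====
theorem solution_spec : Claim_equal_solution := by
  intro order _
  show solution order = solution_alt order
  unfold solution solution_alt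
  have := loops_eq order [] 1 (order.length : Int) 0 (by simp) (by simp)
    (by have := Int.natCast_nonneg order.length; omega)
  simpa [flatRuns] using this
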